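-- pv_equiv track=rewrite | github.com/JEANMORPHIUS/JAN | scripts/automated_scripture_compliance_fixer.py | _build_docstring
-- ===== SOURCE A (Python) =====
-- MISSION_STATEMENT = """THIS IS STEWARDSHIP AND COMMUNITY WITH THE RIGHT SPIRITS
-- LOVE IS THE HIGHEST MASTERY
-- ENERGY + LOVE = WE ALL WIN
-- PEACE, LOVE, UNITY"""
--
-- TABLE_CONNECTION = "PANGEA IS THE TABLE.\nYOU DON'T BETRAY THE TABLE."
--
-- def _build_docstring(existing_content: str, needs_mission: bool, needs_table: bool, comment_style: str = 'python') -> str: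
--     """Build complete docstring"""
--     lines = []
--
--     # Add existing content if it exists and is meaningful
--     if existing_content and len(existing_content.strip()) > 10:
--         lines.append(existing_content.strip())
--         lines.append("")
--
--     # Add philosophy header
--     if comment_style == 'python':
--         lines.append("DEVELOPMENT PHILOSOPHY: THE CHOSEN ONE")
--         lines.append("Spiritual Alignment Over Mechanical Productivity")
--         lines.append("")
--     else:
--         lines.append(" * DEVELOPMENT PHILOSOPHY: THE CHOSEN ONE")
--         lines.append(" * Spiritual Alignment Over Mechanical Productivity")
--         lines.append(" *")
--
--     # Add mission if needed
--     if needs_mission: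
--         if comment_style == 'python':
--             lines.append("THE MISSION:")
--             for line in MISSION_STATEMENT.split('\n'):
--                 lines.append(line)
--         else:
--             lines.append(" * THE MISSION:")
--             for line in MISSION_STATEMENT.split('\n'):
--                 lines.append(f" * {line}")
--
--     # Add table if needed
--     if needs_table:
--         if comment_style == 'python':
--             lines.append("")
--             for line in TABLE_CONNECTION.split('\n'):
--                 lines.append(line)
--         else:
--             lines.append(" *")
--             for line in TABLE_CONNECTION.split('\n'):
--                 lines.append(f" * {line}")
--
--     # Add truth
--     if comment_style == 'python':
--         lines.append("")
--         lines.append("THE TRUTH:")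
--         lines.append("WE MUST DEBUG AND BE 100% FOR WHAT COMES AT US.")
--         lines.append("THE REST IS UP TO BABA X.")
--     else:
--         lines.append(" *")
--         lines.append(" * THE TRUTH:")
--         lines.append(" * WE MUST DEBUG AND BE 100% FOR WHAT COMES AT US.")
--         lines.append(" * THE REST IS UP TO BABA X.")
--
--     return '\n'.join(lines)
-- ===== SOURCE B (Python) =====
-- MISSION_STATEMENT = """THIS IS STEWARDSHIP AND COMMUNITY WITH THE RIGHT SPIRITS
-- LOVE IS THE HIGHEST MASTERY
-- ENERGY + LOVE = WE ALL WIN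
-- PEACE, LOVE, UNITY"""
--
-- TABLE_CONNECTION = "PANGEA IS THE TABLE.\nYOU DON'T BETRAY THE TABLE."
--
--
-- def _build_docstring(existing_content: str, needs_mission: bool, needs_table: bool, comment_style: str = 'python') -> str:
--     """Build complete docstring"""
--     # Raw prefix: kept unprefixed in every comment style, exactly as A emits it.
--     prefix = ([existing_content.strip(), ""]
--               if existing_content and len(existing_content.strip()) > 10 else [])
--
--     # One flat list of logical body lines, style-independent.
--     body = (["DEVELOPMENT PHILOSOPHY: THE CHOSEN ONE",
--              "Spiritual Alignment Over Mechanical Productivity",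
--              ""]
--             + (["THE MISSION:"] + MISSION_STATEMENT.split('\n') if needs_mission else [])
--             + ([""] + TABLE_CONNECTION.split('\n') if needs_table else [])
--             + ["",
--                "THE TRUTH:",
--                "WE MUST DEBUG AND BE 100% FOR WHAT COMES AT US.",
--                "THE REST IS UP TO BABA X."])
--
--     if comment_style != 'python':
--         body = [" * " + line if line else " *" for line in body]
--
--     return '\n'.join(prefix + body)
-- ===== Notes on version B (the rewrite author's own statement) =====
-- stated objective: simpler
-- what changed: B builds one flat list of unprefixed body lines and applies a single style formatter (prefix ' * ', blank -> ' *') over it, replacing A's duplicated python/non-python branches in every section; the raw existing-content prefix stays outside the formatting.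
import Mathlib
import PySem

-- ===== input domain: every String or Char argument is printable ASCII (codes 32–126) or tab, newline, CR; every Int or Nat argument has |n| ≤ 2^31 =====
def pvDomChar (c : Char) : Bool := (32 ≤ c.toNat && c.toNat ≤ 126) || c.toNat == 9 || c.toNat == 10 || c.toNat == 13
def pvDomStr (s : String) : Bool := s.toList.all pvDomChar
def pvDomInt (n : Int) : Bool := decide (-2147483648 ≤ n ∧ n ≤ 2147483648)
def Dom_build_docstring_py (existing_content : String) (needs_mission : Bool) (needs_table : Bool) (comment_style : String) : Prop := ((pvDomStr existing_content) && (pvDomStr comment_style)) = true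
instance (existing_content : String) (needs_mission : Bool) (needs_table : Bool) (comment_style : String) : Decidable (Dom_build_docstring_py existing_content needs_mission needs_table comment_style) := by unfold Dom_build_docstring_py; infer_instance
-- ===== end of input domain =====

-- B (simpler): one flat list of unprefixed body lines built once, then a single style
-- formatter mapped over it, instead of A's duplicated python/non-python branches.

def pvMISSION : String := "THIS IS STEWARDSHIP AND COMMUNITY WITH THE RIGHT SPIRITS\nLOVE IS THE HIGHEST MASTERY\nENERGY + LOVE = WE ALL WIN\nPEACE, LOVE, UNITY"
def pvTABLE : String := "PANGEA IS THE TABLE.\nYOU DON'T BETRAY THE TABLE."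

-- s.split('\n'): PySem.Str.split? with a non-empty literal separator never returns none
def pvSplitNL (s : String) : List String := (PySem.Str.split? s "\n").getD []

-- ===== PORT A =====
def build_docstring_py (existing_content : String) (needs_mission : Bool) (needs_table : Bool) (comment_style : String) : String :=
  let lines : List String := []
  let lines := if existing_content ≠ "" ∧ PySem.Str.len (PySem.Str.strip existing_content) > 10
    then lines ++ [PySem.Str.strip existing_content, ""] else lines
  let lines := if comment_style = "python"
    then lines ++ ["DEVELOPMENT PHILOSOPHY: THE CHOSEN ONE",
                   "Spiritual Alignment Over Mechanical Productivity", ""]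
    else lines ++ [" * DEVELOPMENT PHILOSOPHY: THE CHOSEN ONE",
                   " * Spiritual Alignment Over Mechanical Productivity", " *"]
  let lines := if needs_mission then
      (if comment_style = "python"
       then lines ++ ["THE MISSION:"] ++ pvSplitNL pvMISSION
       else lines ++ [" * THE MISSION:"] ++ (pvSplitNL pvMISSION).map (fun l => " * " ++ l))
    else lines
  let lines := if needs_table then
      (if comment_style = "python"
       then lines ++ [""] ++ pvSplitNL pvTABLE
       else lines ++ [" *"] ++ (pvSplitNL pvTABLE).map (fun l => " * " ++ l))
    else lines
  let lines := if comment_style = "python"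
    then lines ++ ["", "THE TRUTH:", "WE MUST DEBUG AND BE 100% FOR WHAT COMES AT US.",
                   "THE REST IS UP TO BABA X."]
    else lines ++ [" *", " * THE TRUTH:", " * WE MUST DEBUG AND BE 100% FOR WHAT COMES AT US.",
                   " * THE REST IS UP TO BABA X."]
  PySem.Str.join "\n" lines

-- ===== PORT B =====
def build_docstring_py_alt (existing_content : String) (needs_mission : Bool) (needs_table : Bool) (comment_style : String) : String :=
  let prefixL : List String :=
    if existing_content ≠ "" ∧ PySem.Str.len (PySem.Str.strip existing_content) > 10
    then [PySem.Str.strip existing_content, ""] else []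
  let body : List String :=
    ["DEVELOPMENT PHILOSOPHY: THE CHOSEN ONE",
     "Spiritual Alignment Over Mechanical Productivity", ""]
    ++ (if needs_mission then ["THE MISSION:"] ++ pvSplitNL pvMISSION else [])
    ++ (if needs_table then [""] ++ pvSplitNL pvTABLE else [])
    ++ ["", "THE TRUTH:", "WE MUST DEBUG AND BE 100% FOR WHAT COMES AT US.",
        "THE REST IS UP TO BABA X."]
  let body := if comment_style ≠ "python"
    then body.map (fun line => if line ≠ "" then " * " ++ line else " *") else body
  PySem.Str.join "\n" (prefixL ++ body)

-- ===== PRECONDITION & SPEC =====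
def Spec_build_docstring_py (existing_content : String) (needs_mission : Bool) (needs_table : Bool) (comment_style : String) (out : String) : Prop := out = build_docstring_py_alt existing_content needs_mission needs_table comment_style
instance (existing_content : String) (needs_mission : Bool) (needs_table : Bool) (comment_style : String) (out : String) : Decidable (Spec_build_docstring_py existing_content needs_mission needs_table comment_style out) := by unfold Spec_build_docstring_py; infer_instance

-- ===== CLAIM (what is proved, stated in full; the proofs are below) =====
def Claim_equal_build_docstring_py : Prop := ∀ (existing_content : String) (needs_mission : Bool) (needs_table : Bool) (comment_style : String), Dom_build_docstring_py existing_content needs_mission needs_table comment_style → Spec_build_docstring_py existing_content needs_mission needs_table comment_style (build_docstring_py existing_content needs_mission needs_table comment_style)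

-- ===== LEMMAS AND PROOFS =====

-- ===== VERDICT (by name: the statement is the Claim_ definition above) =====
set_option maxHeartbeats 1000000 in
set_option maxRecDepth 4096 in
theorem build_docstring_py_spec : Claim_equal_build_docstring_py := by
  intro ec nm nt cs _
  unfold Spec_build_docstring_py build_docstring_py build_docstring_py_alt
  by_cases hcs : cs = "python" <;>
    cases nm <;> cases nt <;>
    by_cases hec : ec ≠ "" ∧ PySem.Str.len (PySem.Str.strip ec) > 10 <;>
    simp only [hcs, hec, if_pos, if_neg, ne_eq, not_true, not_false_iff, List.nil_append] <;>
    (try congr 1) <;> rfl
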